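-- pv_equiv track=rewrite | github.com/BARarch/My-Hackerranks | comfortableNumbers2200412.py | comfortableNumbers
-- ===== SOURCE A (Python) =====
-- def comfortableNumbers(l, r):
--     def upper(a):
--         return a + sum(map(int, str(a)))
--
--     def lower(a):
--         return a - sum(map(int, str(a)))
--
--     def test_b(a):
--         def test(b):
--             return a >= lower(b)
--         return test
--
--     H2 = {a: list(filter(test_b(a), range(a + 1, min(r + 1, upper(a) + 1)))) for a in range(l, r + 1)}
--
--     return sum(map(len, H2.values()))
-- ===== SOURCE B (Python) =====
-- def comfortableNumbers(l, r):
--     if l > r: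
--         return 0
--     s = [sum(map(int, str(x))) for x in range(l, r + 1)]
--     m = 0
--     for v in s:
--         if v > m:
--             m = v
--     total = 0
--     for d in range(1, m + 1):
--         for i in range(0, len(s) - d):
--             if s[i] >= d and s[i + d] >= d:
--                 total += 1
--     return total
-- ===== Notes on version B (the rewrite author's own statement) =====
-- stated objective: alternative
-- what changed: B precomputes one digit-sum table for l..r, then counts pairs by iterating over the gap d = b-a (1..max digit sum) and counting positions whose two digit sums both reach d, instead of A's per-a dict comprehension of filtered b-ranges built from closures.
-- outside the precondition, e.g. on comfortableNumbers(-3, 5): A raises ValueError, B raises ValueError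
import Mathlib
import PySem

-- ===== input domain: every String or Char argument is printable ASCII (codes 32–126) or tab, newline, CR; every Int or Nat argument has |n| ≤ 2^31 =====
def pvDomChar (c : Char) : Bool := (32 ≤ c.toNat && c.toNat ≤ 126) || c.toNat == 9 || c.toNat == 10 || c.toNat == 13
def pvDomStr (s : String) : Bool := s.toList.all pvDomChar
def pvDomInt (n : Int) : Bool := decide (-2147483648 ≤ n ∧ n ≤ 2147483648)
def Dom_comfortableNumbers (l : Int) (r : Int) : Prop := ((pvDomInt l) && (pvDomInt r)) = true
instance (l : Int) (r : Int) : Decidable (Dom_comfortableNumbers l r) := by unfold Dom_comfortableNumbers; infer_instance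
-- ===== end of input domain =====

-- B replaces A's per-a dict-of-lists comprehension by a digit-sum table and a loop over the
-- gap d, counting for each d the positions whose two digit sums both reach d (objective: simpler).

-- sum(map(int, str(x))): exact for x ≥ 0 (every char of str(x) is then a decimal digit,
-- and int(c) = c.toNat - 48 on digit chars); inputs making A see a negative x are outside Pre_.
def pvDS (n : Int) : Int := ((PySem.Int.toChars n).map (fun c => ((c.toNat : Int) - 48))).sum

-- ===== PORT A =====
def comfortableNumbers (l : Int) (r : Int) : Int :=
  let upper := fun a => a + pvDS a
  let lower := fun b => b - pvDS b
  -- dict comprehension (keys l..r are distinct): association list in insertion order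
  let H2 : List (Int × List Int) :=
    (PySem.List.pyRange l (r+1)).map (fun a =>
      (a, (PySem.List.pyRange (a+1) (min (r+1) (upper a + 1))).filter
            (fun b => decide (a ≥ lower b))))
  ((H2.map (·.2)).map (fun v => (v.length : Int))).sum

-- ===== PORT B =====
def comfortableNumbers_alt (l : Int) (r : Int) : Int :=
  if l > r then 0
  else
    let s := (PySem.List.pyRange l (r+1)).map pvDS
    let m := s.foldl (fun m v => if v > m then v else m) 0
    (PySem.List.pyRange 1 (m+1)).foldl (fun tot d =>
      (PySem.List.pyRange 0 ((s.length : Int) - d)).foldl (fun tot i =>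
        if PySem.List.pyGetD s i 0 ≥ d ∧ PySem.List.pyGetD s (i+d) 0 ≥ d
        then tot + 1 else tot) tot) 0

-- ===== PRECONDITION & SPEC =====
-- Pre_ excludes only inputs on which A raises: with l ≤ r and l < 0, int('-') in A's digit-sum raises ValueError.
def Pre_comfortableNumbers (l : Int) (r : Int) : Prop := r < l ∨ 0 ≤ l
instance (l : Int) (r : Int) : Decidable (Pre_comfortableNumbers l r) := by
  unfold Pre_comfortableNumbers; infer_instance

def pvWitness_comfortableNumbers : Int × Int := (0, 20)

def Spec_comfortableNumbers (l : Int) (r : Int) (out : Int) : Prop := out = comfortableNumbers_alt l r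
instance (l : Int) (r : Int) (out : Int) : Decidable (Spec_comfortableNumbers l r out) := by
  unfold Spec_comfortableNumbers; infer_instance

-- ===== CLAIM (what is proved, stated in full; the proofs are below) =====
def Claim_equal_comfortableNumbers : Prop := ∀ (l : Int) (r : Int), Dom_comfortableNumbers l r → Pre_comfortableNumbers l r → Spec_comfortableNumbers l r (comfortableNumbers l r)

-- ===== LEMMAS AND PROOFS =====

-- the pair (a, a+d) indicator both sides count
def pvG (r a d : Int) : Int :=
  if a + d ≤ r ∧ d ≤ pvDS a ∧ d ≤ pvDS (a+d) then 1 else 0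

theorem digitChar_ge (n : Nat) (h : n < 10) : 48 ≤ (Nat.digitChar n).toNat := by
  interval_cases n <;> decide

theorem toDigitsCore_ge (f : Nat) : ∀ (n : Nat) (acc : List Char),
    (∀ c ∈ acc, 48 ≤ c.toNat) → ∀ c ∈ Nat.toDigitsCore 10 f n acc, 48 ≤ c.toNat := by
  induction f with
  | zero => intro n acc hacc c hc; exact hacc c hc
  | succ f ih =>
      intro n acc hacc c hc
      simp only [Nat.toDigitsCore] at hc
      have hstep : ∀ c ∈ Nat.digitChar (n % 10) :: acc, 48 ≤ c.toNat := by
        intro c hc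
        rcases hc with _ | hc
        · exact digitChar_ge _ (Nat.mod_lt _ (by omega))
        · exact hacc c (by assumption)
      split at hc
      · exact hstep c hc
      · exact ih (n / 10) _ hstep c hc

theorem pvDS_nonneg {n : Int} (h : 0 ≤ n) : 0 ≤ pvDS n := by
  unfold pvDS
  refine List.sum_nonneg ?_
  intro x hx
  rcases List.mem_map.mp hx with ⟨c, hc, rfl⟩
  have : 48 ≤ c.toNat := by
    unfold PySem.Int.toChars at hc
    rw [if_neg (by omega)] at hc
    exact toDigitsCore_ge _ _ _ (by intro c hc; cases hc) c hc
  omega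

theorem sum_map_swap (xs ys : List Int) (F : Int → Int → Int) :
    (xs.map (fun a => (ys.map (F a)).sum)).sum
      = (ys.map (fun d => (xs.map (fun a => F a d)).sum)).sum := by
  induction xs with
  | nil => simp
  | cons x t ih =>
      simp only [List.map_cons, List.sum_cons, ih]
      rw [← PySem.List.sum_map_add_int]

-- A-side row: the filter length, re-expressed over the gap range 1..m
theorem rowA (l r a m : Int) (hl : 0 ≤ l) (ha1 : l ≤ a) (ha2 : a ≤ r)
    (hdm : pvDS a ≤ m) :
    (((PySem.List.pyRange (a+1) (min (r+1) (a + pvDS a + 1))).filter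
        (fun b => decide (a ≥ b - pvDS b))).length : Int)
      = ((PySem.List.pyRange 1 (m+1)).map (pvG r a)).sum := by
  have hds : 0 ≤ pvDS a := pvDS_nonneg (by omega)
  set u : Int := min (r+1) (a + pvDS a + 1) with hu
  have hu1 : a + 1 ≤ u := by simp only [hu, le_min_iff]; omega
  have hu2 : u ≤ a + 1 + m := by
    have := min_le_right (r+1) (a + pvDS a + 1); omega
  rw [← List.countP_eq_length_filter]
  -- the filtered count equals the count over the full gap window a+1 .. a+1+m
  have hsplit : ((PySem.List.pyRange (a+1) (a+1+m)).countP
      (fun b => decide (b < u ∧ a ≥ b - pvDS b)))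
      = ((PySem.List.pyRange (a+1) u).countP (fun b => decide (a ≥ b - pvDS b))) := by
    rw [PySem.List.pyRange_one_append (a+1) u (a+1+m) hu1 hu2, List.countP_append]
    have h2 : ((PySem.List.pyRange u (a+1+m)).countP
        (fun b => decide (b < u ∧ a ≥ b - pvDS b))) = 0 := by
      refine List.countP_eq_zero.mpr ?_
      intro b hb
      have hb' := PySem.List.mem_pyRange_one.mp hb
      simp only [decide_eq_true_eq, not_and]
      omega
    rw [h2, Nat.add_zero]
    refine List.countP_congr ?_
    intro b hb
    have hb' := PySem.List.mem_pyRange_one.mp hb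
    simp [hb'.2]
  rw [← hsplit]
  rw [← PySem.List.sum_map_ite_one_zero (fun b => decide (b < u ∧ a ≥ b - pvDS b))]
  rw [PySem.List.pyRange_one (a+1) (a+1+m), PySem.List.pyRange_one 1 (m+1)]
  have e1 : (a + 1 + m - (a + 1)) = m := by ring
  have e2 : (m + 1 - 1) = m := by ring
  rw [e1, e2, List.map_map, List.map_map]
  refine congrArg List.sum (List.map_congr_left ?_)
  intro k hk
  have hk' : (k : Int) < m := by
    have := List.mem_range.mp hk
    omega
  simp only [Function.comp, pvG, decide_eq_true_eq, hu, lt_min_iff]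
  have e3 : a + 1 + (k : Int) = a + (1 + (k : Int)) := by ring
  rw [e3]
  split_ifs <;> first | rfl | (exfalso; omega)

-- B-side column: the per-d count over table indices equals the sum of pvG over a
theorem colB (l r d : Int) (_hl : 0 ≤ l) (hlr : l ≤ r) (hd : 1 ≤ d) :
    (((PySem.List.pyRange 0 ((((PySem.List.pyRange l (r+1)).map pvDS).length : Int) - d)).countP
        (fun i => decide (PySem.List.pyGetD ((PySem.List.pyRange l (r+1)).map pvDS) i 0 ≥ d ∧
                          PySem.List.pyGetD ((PySem.List.pyRange l (r+1)).map pvDS) (i+d) 0 ≥ d)) : Int))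
      = ((PySem.List.pyRange l (r+1)).map (fun a => pvG r a d)).sum := by
  have hlen : (((PySem.List.pyRange l (r+1)).map pvDS).length : Int) = r + 1 - l := by
    rw [List.length_map, PySem.List.length_pyRange_one]
    omega
  have hL : (((PySem.List.pyRange 0 ((((PySem.List.pyRange l (r+1)).map pvDS).length : Int) - d)).countP
        (fun i => decide (PySem.List.pyGetD ((PySem.List.pyRange l (r+1)).map pvDS) i 0 ≥ d ∧
                          PySem.List.pyGetD ((PySem.List.pyRange l (r+1)).map pvDS) (i+d) 0 ≥ d)) : Int))
      = ((List.range (r+1-l-d-0).toNat).map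
          (fun (k : Nat) => if l + (k:Int) + d ≤ r ∧ d ≤ pvDS (l + (k:Int)) ∧ d ≤ pvDS (l + (k:Int) + d)
                    then (1:Int) else 0)).sum := by
    rw [hlen, ← PySem.List.sum_map_ite_one_zero, PySem.List.pyRange_one 0 (r+1-l-d), List.map_map]
    refine congrArg List.sum (List.map_congr_left ?_)
    intro k hk
    have hk' : k < (r+1-l-d-0).toNat := List.mem_range.mp hk
    have hk1 : k < (r+1-l).toNat := by omega
    have hk2 : k + d.toNat < (r+1-l).toNat := by omega
    simp only [Function.comp, zero_add]
    rw [PySem.List.pyGetD_map_pyRange_one pvDS l (r+1) k 0 hk1,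
        show (k:Int) + d = ((k + d.toNat : Nat) : Int) from by omega,
        PySem.List.pyGetD_map_pyRange_one pvDS l (r+1) (k + d.toNat) 0 hk2,
        show l + ((k + d.toNat : Nat) : Int) = l + (k:Int) + d from by omega]
    simp only [ge_iff_le, decide_eq_true_eq]
    split_ifs <;> first | rfl | (exfalso; omega)
  have hR : ((PySem.List.pyRange l (r+1)).map (fun a => pvG r a d)).sum
      = ((List.range (r+1-l-d-0).toNat).map
          (fun (k : Nat) => if l + (k:Int) + d ≤ r ∧ d ≤ pvDS (l + (k:Int)) ∧ d ≤ pvDS (l + (k:Int) + d)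
                    then (1:Int) else 0)).sum := by
    rw [PySem.List.pyRange_one l (r+1), List.map_map,
        show (r+1-l).toNat = (r+1-l-d-0).toNat + ((r+1-l).toNat - (r+1-l-d-0).toNat) from by omega,
        List.range_add, List.map_append, List.sum_append, List.map_map]
    have h0 : ((List.range ((r+1-l).toNat - (r+1-l-d-0).toNat)).map
        (((fun a => pvG r a d) ∘ fun (k : Nat) => l + (k:Int)) ∘
          (fun (j : Nat) => (r+1-l-d-0).toNat + j))).sum = 0 := by
      refine List.sum_eq_zero ?_
      intro x hx
      rcases List.mem_map.mp hx with ⟨j, hj, rfl⟩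
      simp only [Function.comp, pvG]
      rw [if_neg]
      rintro ⟨h1, -, -⟩
      omega
    rw [h0, add_zero]
    refine congrArg List.sum (List.map_congr_left ?_)
    intro k hk
    simp only [Function.comp, pvG]
  rw [hL, hR]

-- ===== VERDICT (by name: the statement is the Claim_ definition above) =====
theorem maxbody (acc x : Int) : (if x > acc then x else acc) = max acc x := by
  simp only [max_def]; split_ifs <;> omega

theorem comfortableNumbers_spec : Claim_equal_comfortableNumbers := by
  intro l r _hdom hpre
  unfold Spec_comfortableNumbers
  by_cases hgt : l > r
  · simp [comfortableNumbers, comfortableNumbers_alt, hgt,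
      PySem.List.pyRange_one_eq_nil (by omega : r + 1 ≤ l)]
  · have hlr : l ≤ r := by omega
    have hl : 0 ≤ l := by rcases hpre with h | h; omega; exact h
    -- name the table and the max
    set s : List Int := (PySem.List.pyRange l (r+1)).map pvDS with hs
    set m : Int := s.foldl (fun m v => if v > m then v else m) 0 with hm
    have hmmax : m = s.foldl max 0 := by
      rw [hm, PySem.List.foldl_congr_mem s _ max 0 (by intro acc x _; exact maxbody acc x)]
    have hm0 : 0 ≤ m := by rw [hmmax]; exact (PySem.List.le_foldl_max s 0).1
    have hmax : ∀ a, a ∈ PySem.List.pyRange l (r+1) → pvDS a ≤ m := by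
      intro a ha
      rw [hmmax]
      exact (PySem.List.le_foldl_max s 0).2 (pvDS a) (by rw [hs]; exact List.mem_map_of_mem ha)
    -- A side
    have hA : comfortableNumbers l r
        = ((PySem.List.pyRange l (r+1)).map
            (fun a => ((PySem.List.pyRange 1 (m+1)).map (pvG r a)).sum)).sum := by
      unfold comfortableNumbers
      simp only [List.map_map]
      congr 1
      refine List.map_congr_left ?_
      intro a ha
      have hab := PySem.List.mem_pyRange_one.mp ha
      exact rowA l r a m hl hab.1 (by omega) (hmax a ha)
    -- B side
    have hB : comfortableNumbers_alt l r
        = ((PySem.List.pyRange 1 (m+1)).map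
            (fun d => ((PySem.List.pyRange l (r+1)).map (fun a => pvG r a d)).sum)).sum := by
      unfold comfortableNumbers_alt
      rw [if_neg (by omega)]
      simp only []
      rw [← hs, ← hm]
      rw [PySem.List.foldl_congr_mem _ _
        (fun tot d => tot + (((PySem.List.pyRange 0 ((s.length : Int) - d)).countP
          (fun i => decide (PySem.List.pyGetD s i 0 ≥ d ∧ PySem.List.pyGetD s (i+d) 0 ≥ d)) : Int)))
        0 ?_]
      · rw [PySem.List.foldl_add, zero_add]
        congr 1
        refine List.map_congr_left ?_
        intro d hd
        have hdm := PySem.List.mem_pyRange_one.mp hd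
        exact colB l r d hl hlr hdm.1
      · intro acc d _
        exact PySem.List.foldl_ite_add_one _ _ acc
    rw [hA, hB]
    exact sum_map_swap _ _ (pvG r)
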